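-- pv_equiv track=rewrite | github.com/jeevesh415/OpenThoughts-Agent | data/unique_scale/tezos/generate_tezos_40x.py | upsample_to_target
-- ===== SOURCE A (Python) =====
-- def upsample_to_target(
--     instructions: list,
--     metadata: list,
--     target_count: int,
-- ) -> tuple[list, list]:
--     """Upsample data by duplicating entries to reach target count."""
--     upsampled_instructions = []
--     upsampled_metadata = []
--
--     idx = 0
--     while len(upsampled_instructions) < target_count:
--         upsampled_instructions.append(instructions[idx % len(instructions)])
--         upsampled_metadata.append(metadata[idx % len(metadata)])
--         idx += 1
--
--     return upsampled_instructions, upsampled_metadata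
-- ===== SOURCE B (Python) =====
-- def upsample_to_target(
--     instructions: list,
--     metadata: list,
--     target_count: int,
-- ) -> tuple[list, list]:
--     """Upsample data by duplicating entries to reach target count."""
--     if target_count <= 0:
--         return [], []
--     reps_i = -(-target_count // len(instructions))
--     reps_m = -(-target_count // len(metadata))
--     return (instructions * reps_i)[:target_count], (metadata * reps_m)[:target_count]
-- ===== Notes on version B (the rewrite author's own statement) =====
-- stated objective: simpler
-- what changed: Replaces the element-by-element while/append cycling loop with a closed-form repeat-and-slice: compute the ceiling number of repetitions per list, multiply the list and slice to target_count.
import Mathlib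
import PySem

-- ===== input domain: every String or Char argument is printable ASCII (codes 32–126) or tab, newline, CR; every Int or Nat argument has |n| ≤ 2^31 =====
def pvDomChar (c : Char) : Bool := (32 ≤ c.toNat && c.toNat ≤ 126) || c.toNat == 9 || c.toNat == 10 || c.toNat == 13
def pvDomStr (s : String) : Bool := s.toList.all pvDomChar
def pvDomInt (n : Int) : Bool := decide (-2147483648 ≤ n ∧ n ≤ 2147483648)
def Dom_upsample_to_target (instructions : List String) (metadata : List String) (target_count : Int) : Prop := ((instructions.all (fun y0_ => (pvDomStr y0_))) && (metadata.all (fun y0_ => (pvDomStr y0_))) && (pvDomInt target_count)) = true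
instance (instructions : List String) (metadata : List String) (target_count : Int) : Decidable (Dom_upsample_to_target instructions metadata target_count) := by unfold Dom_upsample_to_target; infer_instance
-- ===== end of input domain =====

-- ===== PORT A =====
-- B replaces the element-by-element cycling loop with closed-form ceil-repetition and slice (same return values).
-- the while loop of A: appends one cyclic element to each accumulator per iteration
def upsampleLoopA (instructions metadata : List String) (target_count : Int)
    (accI accM : List String) (idx : Int) : List String × List String :=
  if h : (accI.length : Int) < target_count then
    upsampleLoopA instructions metadata target_count
      (accI ++ [(PySem.List.pyGet? instructions (PySem.Int.mod idx instructions.length)).getD ""])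
      (accM ++ [(PySem.List.pyGet? metadata (PySem.Int.mod idx metadata.length)).getD ""])
      (idx + 1)
  else (accI, accM)
termination_by (target_count - accI.length).toNat
decreasing_by simp; omega

def upsample_to_target (instructions : List String) (metadata : List String) (target_count : Int) : List String × List String :=
  upsampleLoopA instructions metadata target_count [] [] 0

-- ===== PORT B =====
def upsample_to_target_alt (instructions : List String) (metadata : List String) (target_count : Int) : List String × List String :=
  if target_count ≤ 0 then ([], []) else
    let reps_i : Int := -(PySem.Int.floordiv (-target_count) instructions.length)
    let reps_m : Int := -(PySem.Int.floordiv (-target_count) metadata.length)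
    (((List.replicate reps_i.toNat instructions).flatten).take target_count.toNat,
     ((List.replicate reps_m.toNat metadata).flatten).take target_count.toNat)

-- ===== PRECONDITION & SPEC =====
-- Pre_ excludes exactly the inputs where A raises ZeroDivisionError (idx % 0): positive target with an empty list.
def Pre_upsample_to_target (instructions : List String) (metadata : List String) (target_count : Int) : Prop :=
  target_count ≤ 0 ∨ (instructions ≠ [] ∧ metadata ≠ [])
instance (instructions : List String) (metadata : List String) (target_count : Int) : Decidable (Pre_upsample_to_target instructions metadata target_count) := by unfold Pre_upsample_to_target; infer_instance
def pvWitness_upsample_to_target : List String × List String × Int := (["a", "b"], ["x", "y", "z"], 7)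

def Spec_upsample_to_target (instructions : List String) (metadata : List String) (target_count : Int) (out : List String × List String) : Prop := out = upsample_to_target_alt instructions metadata target_count
instance (instructions : List String) (metadata : List String) (target_count : Int) (out : List String × List String) : Decidable (Spec_upsample_to_target instructions metadata target_count out) := by unfold Spec_upsample_to_target; infer_instance

-- ===== CLAIM (what is proved, stated in full; the proofs are below) =====
def Claim_equal_upsample_to_target : Prop := ∀ (instructions : List String) (metadata : List String) (target_count : Int), Dom_upsample_to_target instructions metadata target_count → Pre_upsample_to_target instructions metadata target_count → Spec_upsample_to_target instructions metadata target_count (upsample_to_target instructions metadata target_count)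

-- ===== LEMMAS AND PROOFS =====

-- the cyclic element A picks at step i
def pvCyc (xs : List String) (i : Int) : String :=
  (PySem.List.pyGet? xs (PySem.Int.mod i xs.length)).getD ""

theorem loopA_eq (ins met : List String) (t : Int) :
    ∀ (m : Nat) (accI accM : List String) (idx : Int),
    (t - accI.length).toNat = m →
    upsampleLoopA ins met t accI accM idx =
      (accI ++ (List.range m).map (fun (j : Nat) => pvCyc ins (idx + (j:Int))),
       accM ++ (List.range m).map (fun (j : Nat) => pvCyc met (idx + (j:Int)))) := by
  intro m
  induction m with
  | zero =>
    intro accI accM idx hm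
    rw [upsampleLoopA, dif_neg (by omega)]
    simp
  | succ m ih =>
    intro accI accM idx hm
    rw [upsampleLoopA, dif_pos (by omega)]
    rw [ih _ _ (idx + 1) (by simp; omega)]
    simp only [List.range_succ_eq_map, List.map_cons, List.map_map, List.append_assoc,
      List.cons_append, List.nil_append, pvCyc, Prod.mk.injEq]
    refine ⟨?_, ?_⟩ <;>
    · congr 1
      congr 1
      · norm_num
      · apply List.map_congr_left
        intro j _
        have hidx : idx + 1 + (j : Int) = idx + ((Nat.succ j : Nat) : Int) := by
          push_cast; ring
        simp only [Function.comp_apply, hidx]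

theorem flatten_replicate_eq_map (xs : List String) (hxs : xs ≠ []) :
    ∀ (r : Nat),
    (List.replicate r xs).flatten =
      (List.range (r * xs.length)).map (fun j => xs.getD (j % xs.length) "") := by
  intro r
  induction r with
  | zero => simp
  | succ r ih =>
    have hlen : 0 < xs.length := List.length_pos_iff.mpr hxs
    rw [List.replicate_succ, List.flatten_cons, ih]
    have hr : (r + 1) * xs.length = xs.length + r * xs.length := by ring
    rw [hr, List.range_add, List.map_append, List.map_map]
    congr 1
    · -- map over range len reproduces xs
      apply List.ext_getElem
      · simp
      · intro i h1 h2
        simp only [List.getElem_map, List.getElem_range]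
        have hi : i < xs.length := by simpa using h1
        rw [Nat.mod_eq_of_lt hi, List.getD_eq_getElem _ _ hi]
    · congr 1
      funext j
      simp [Nat.add_mod_left]

theorem pvCyc_natCast (xs : List String) (hxs : xs ≠ []) (j : Nat) :
    pvCyc xs (j : Int) = xs.getD (j % xs.length) "" := by
  have hlen : 0 < xs.length := List.length_pos_iff.mpr hxs
  unfold pvCyc
  rw [PySem.Int.mod_natCast, PySem.List.pyGet?_natCast, List.getD_eq_getElem?_getD]

theorem alt_component (xs : List String) (t : Int) (hxs : xs ≠ []) (ht : 0 < t) :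
    ((List.replicate (-(PySem.Int.floordiv (-t) xs.length)).toNat xs).flatten).take t.toNat
      = (List.range t.toNat).map (fun (j : Nat) => pvCyc xs ((0 : Int) + (j:Int))) := by
  have hlen : 0 < xs.length := List.length_pos_iff.mpr hxs
  set r : Int := -(PySem.Int.floordiv (-t) xs.length) with hrdef
  have hbr := (PySem.Int.neg_floordiv_neg_eq_iff_of_pos (a := t) (b := (xs.length : Int))
    (by exact_mod_cast hlen)).mp hrdef.symm
  have hrle : t ≤ r * xs.length := hbr.2
  have hrpos : 0 < r := by nlinarith
  have hcast : ((r.toNat * xs.length : Nat) : Int) = r * xs.length := by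
    push_cast [Int.toNat_of_nonneg hrpos.le]; ring
  have hle : t.toNat ≤ r.toNat * xs.length := Int.toNat_le.mpr (by rw [hcast]; exact hrle)
  rw [flatten_replicate_eq_map xs hxs, ← List.map_take, List.take_range, Nat.min_eq_left hle]
  apply List.map_congr_left
  intro j hj
  rw [show (0 : Int) + (j : Int) = (j : Int) by ring, pvCyc_natCast xs hxs]

-- ===== VERDICT (by name: the statement is the Claim_ definition above) =====
theorem upsample_to_target_spec : Claim_equal_upsample_to_target := by
  intro ins met t _ hpre
  unfold Spec_upsample_to_target upsample_to_target upsample_to_target_alt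
  by_cases ht : t ≤ 0
  · rw [loopA_eq ins met t 0 [] [] 0 (by simp; omega)]
    simp [ht]
  · rcases hpre with h | ⟨hins, hmet⟩
    · omega
    · rw [loopA_eq ins met t t.toNat [] [] 0 (by simp)]
      rw [if_neg (by omega)]
      simp only [List.nil_append]
      exact Prod.ext (alt_component ins t hins (by omega)).symm (alt_component met t hmet (by omega)).symm
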